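-- pv_equiv track=rewrite | github.com/yuriirask-bit/d365fo-security-mcp | src/d365fo_security_mcp/tools/sod/detector.py | build_sub_role_map
-- ===== SOURCE A (Python) =====
-- from typing import Any
--
-- def build_sub_role_map(
--     sub_roles_data: list[dict[str, Any]],
-- ) -> dict[str, list[str]]:
--     """Build parent → children sub-role map from OData query result.
--
--     Expected fields per record: SecurityRoleIdentifier, SecuritySubRoleIdentifier.
--     """
--     result: dict[str, list[str]] = {}
--     for row in sub_roles_data:
--         parent = row.get("SecurityRoleIdentifier", "")
--         child = row.get("SecuritySubRoleIdentifier", "")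
--         if parent and child:
--             result.setdefault(parent, []).append(child)
--     return result
-- ===== SOURCE B (Python) =====
-- def build_sub_role_map(sub_roles_data):
--     """Build parent -> children sub-role map from OData query result."""
--     pairs = [
--         (p, c)
--         for p, c in (
--             (row.get("SecurityRoleIdentifier", ""), row.get("SecuritySubRoleIdentifier", ""))
--             for row in sub_roles_data
--         )
--         if p and c
--     ]
--     return {p: [c for q, c in pairs if q == p] for p, _ in pairs}
-- ===== Notes on version B (the rewrite author's own statement) =====
-- stated objective: alternative
-- what changed: Replaces the one-pass setdefault/append accumulation with a two-phase approach: first extract the valid (parent, child) pairs, then build the result as a dict comprehension that recomputes each parent's full child list by filtering the pair list.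
import Mathlib
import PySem

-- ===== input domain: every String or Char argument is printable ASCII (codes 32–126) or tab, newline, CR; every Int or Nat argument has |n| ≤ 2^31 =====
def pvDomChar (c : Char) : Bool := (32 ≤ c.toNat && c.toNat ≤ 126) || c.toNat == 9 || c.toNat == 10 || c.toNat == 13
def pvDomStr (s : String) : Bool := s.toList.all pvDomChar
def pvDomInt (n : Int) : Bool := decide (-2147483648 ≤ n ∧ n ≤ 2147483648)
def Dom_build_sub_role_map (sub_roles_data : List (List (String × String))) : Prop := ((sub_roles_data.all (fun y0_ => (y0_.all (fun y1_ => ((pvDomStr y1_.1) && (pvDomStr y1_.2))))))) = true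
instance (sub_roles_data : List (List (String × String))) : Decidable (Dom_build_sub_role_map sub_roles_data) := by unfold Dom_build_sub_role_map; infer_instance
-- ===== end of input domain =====

-- B replaces A's one-pass setdefault accumulation by a pair-extraction pass followed by a
-- dict comprehension that filters the pair list per parent (alternative decomposition, not faster).

-- ===== PORT A =====
def build_sub_role_map (sub_roles_data : List (List (String × String))) : List (String × List String) :=
  (sub_roles_data.foldl
    (fun result row =>
      let parent := (PySem.Dict.mk row).getD "SecurityRoleIdentifier" ""
      let child := (PySem.Dict.mk row).getD "SecuritySubRoleIdentifier" ""
      if parent ≠ "" ∧ child ≠ "" then result.modify parent [] (· ++ [child]) else result)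
    PySem.Dict.empty).items

-- ===== PORT B =====
def pvExtract (row : List (String × String)) : String × String :=
  ((PySem.Dict.mk row).getD "SecurityRoleIdentifier" "",
   (PySem.Dict.mk row).getD "SecuritySubRoleIdentifier" "")

def build_sub_role_map_alt (sub_roles_data : List (List (String × String))) : List (String × List String) :=
  let pairs := (sub_roles_data.map pvExtract).filter (fun pc => decide (pc.1 ≠ "" ∧ pc.2 ≠ ""))
  -- dict comprehension {p: [c for q, c in pairs if q == p] for p, _ in pairs}
  (pairs.foldl
    (fun d pc => d.insert pc.1 ((pairs.filter (fun qc => qc.1 == pc.1)).map (·.2)))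
    PySem.Dict.empty).items

-- ===== PRECONDITION & SPEC =====
def Spec_build_sub_role_map (sub_roles_data : List (List (String × String))) (out : List (String × List String)) : Prop := out = build_sub_role_map_alt sub_roles_data
instance (sub_roles_data : List (List (String × String))) (out : List (String × List String)) : Decidable (Spec_build_sub_role_map sub_roles_data out) := by unfold Spec_build_sub_role_map; infer_instance

-- ===== CLAIM (what is proved, stated in full; the proofs are below) =====
def Claim_equal_build_sub_role_map : Prop := ∀ (sub_roles_data : List (List (String × String))), Dom_build_sub_role_map sub_roles_data → Spec_build_sub_role_map sub_roles_data (build_sub_role_map sub_roles_data)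

-- ===== LEMMAS AND PROOFS =====

-- A's row loop is the pair loop over the extracted, filtered pairs.
theorem foldA_eq_pairs (rows : List (List (String × String)))
    (d : PySem.Dict String (List String)) :
    rows.foldl
      (fun result row =>
        let parent := (PySem.Dict.mk row).getD "SecurityRoleIdentifier" ""
        let child := (PySem.Dict.mk row).getD "SecuritySubRoleIdentifier" ""
        if parent ≠ "" ∧ child ≠ "" then result.modify parent [] (· ++ [child]) else result)
      d
    = ((rows.map pvExtract).filter (fun pc => decide (pc.1 ≠ "" ∧ pc.2 ≠ ""))).foldl
        (fun result pc => result.modify pc.1 [] (· ++ [pc.2])) d := by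
  induction rows generalizing d with
  | nil => rfl
  | cons r rs ih =>
    simp only [List.foldl_cons, List.map_cons, List.filter_cons]
    by_cases h : ((PySem.Dict.mk r).getD "SecurityRoleIdentifier" "" ≠ "" ∧
        (PySem.Dict.mk r).getD "SecuritySubRoleIdentifier" "" ≠ "")
    · simp [pvExtract, h, ih]
    · simp [pvExtract, h, ih]

-- getD through B's insert loop: each key gets its (prefix-independent) value f k.
theorem getD_foldl_insert_fun {ν : Type} (l : List (String × String))
    (f : String → ν) (d : PySem.Dict String ν) (k : String) (d0 : ν) :
    (l.foldl (fun d pc => d.insert pc.1 (f pc.1)) d).getD k d0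
      = if k ∈ l.map (·.1) then f k else d.getD k d0 := by
  induction l generalizing d with
  | nil => simp
  | cons p ps ih =>
    simp only [List.foldl_cons, List.map_cons, List.mem_cons]
    rw [ih]
    by_cases hk : k ∈ ps.map (·.1)
    · simp [hk]
    · simp only [hk, PySem.Dict.getD_insert]
      split <;> simp_all

theorem items_modify_eq_items_insert (pairs : List (String × String)) :
    (pairs.foldl (fun result pc => result.modify pc.1 [] (· ++ [pc.2])) PySem.Dict.empty).items
    = (pairs.foldl
        (fun d pc => d.insert pc.1 ((pairs.filter (fun qc => qc.1 == pc.1)).map (·.2)))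
        PySem.Dict.empty).items := by
  set dA := pairs.foldl (fun result pc => result.modify pc.1 [] (· ++ [pc.2])) PySem.Dict.empty with hA
  set dB := pairs.foldl
      (fun d pc => d.insert pc.1 ((pairs.filter (fun qc => qc.1 == pc.1)).map (·.2)))
      PySem.Dict.empty with hB
  have hkA : dA.keys = PySem.Set.update (PySem.Dict.empty : PySem.Dict String (List String)).keys (pairs.map (·.1)) := by
    rw [hA]
    exact PySem.Dict.keys_foldl_modify_key pairs (·.1) [] (fun (_ : PySem.Dict String (List String)) (pc : String × String) => (· ++ [pc.2])) _
  have hkB : dB.keys = PySem.Set.update (PySem.Dict.empty : PySem.Dict String (List String)).keys (pairs.map (·.1)) := by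
    rw [hB]
    exact PySem.Dict.keys_foldl_insert_key pairs (·.1)
      (fun d pc => (pairs.filter (fun qc => qc.1 == pc.1)).map (·.2)) _
  have hndA : dA.keys.Nodup := by
    rw [hA]
    exact PySem.Dict.nodup_keys_foldl_modify_key pairs (·.1) [] (fun (_ : PySem.Dict String (List String)) (pc : String × String) => (· ++ [pc.2])) _
      PySem.Dict.nodup_keys_empty
  have hndB : dB.keys.Nodup := by
    rw [hB]
    exact PySem.Dict.nodup_keys_foldl_insert_key pairs (·.1)
      (fun d pc => (pairs.filter (fun qc => qc.1 == pc.1)).map (·.2)) _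
      PySem.Dict.nodup_keys_empty
  rw [PySem.Dict.items_eq_map_keys dA hndA [], PySem.Dict.items_eq_map_keys dB hndB [],
    hkA, hkB]
  apply List.map_congr_left
  intro k hk
  have hkmem : k ∈ pairs.map (·.1) := by
    rw [PySem.Dict.keys_empty, PySem.Set.update_nil_left] at hk
    exact (PySem.Set.mem_ofList _ _).mp hk
  have hvA : dA.getD k [] = (pairs.filter (fun qc => qc.1 == k)).map (·.2) := by
    rw [hA, PySem.Dict.getD_foldl_modify_append, PySem.Dict.getD_empty]
    simp
  have hvB : dB.getD k [] = (pairs.filter (fun qc => qc.1 == k)).map (·.2) := by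
    rw [hB, getD_foldl_insert_fun pairs (fun p => (pairs.filter (fun qc => qc.1 == p)).map (·.2))]
    simp [hkmem]
  rw [hvA, hvB]

theorem build_sub_role_map_eq (rows : List (List (String × String))) :
    build_sub_role_map rows = build_sub_role_map_alt rows := by
  show _ = build_sub_role_map_alt rows
  unfold build_sub_role_map build_sub_role_map_alt
  rw [foldA_eq_pairs]
  exact items_modify_eq_items_insert _

-- ===== VERDICT (by name: the statement is the Claim_ definition above) =====
theorem build_sub_role_map_spec : Claim_equal_build_sub_role_map := by
  intro rows _
  unfold Spec_build_sub_role_map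
  exact build_sub_role_map_eq rows
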